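-- pv_equiv track=rewrite | github.com/teqn99/coding-test-practice | test_practice/3rd_test/5_올림픽_양초.py | solution
-- ===== SOURCE A (Python) =====
-- def solution(candles):
--     for i in range(len(candles)):  # i: (i + 1)번째 날임을 의미
--         candles.sort(reverse=True)
--         if 0 in candles[:i+1]:
--             return i
--         for j in range(i + 1):
--             candles[j] -= 1
--     return i + 1
-- ===== SOURCE B (Python) =====
-- def solution(candles):
--     # Keeps one ascending sorted list and repairs it each day with a linear
--     # merge instead of re-sorting; does not mutate the input (A sorts/decrements
--     # the caller's list in place).
--     n = len(candles)
--     asc = sorted(candles)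
--     for i in range(n):
--         k = i + 1
--         tail = asc[n - k:]
--         if 0 in tail:
--             return i
--         head = asc[:n - k]
--         burned = [x - 1 for x in tail]
--         merged = []
--         p = q = 0
--         while p < len(head) and q < len(burned):
--             if head[p] <= burned[q]:
--                 merged.append(head[p]); p += 1
--             else:
--                 merged.append(burned[q]); q += 1
--         asc = merged + head[p:] + burned[q:]
--     return n
-- ===== Notes on version B (the rewrite author's own statement) =====
-- stated objective: alternative
-- what changed: B sorts once and then maintains the ascending order incrementally: each day it decrements the top i+1 (a suffix of the sorted list) and restores order with a linear two-pointer merge, replacing A's full re-sort every day; B also leaves the input list unmutated while A sorts and decrements it in place.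
import Mathlib
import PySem

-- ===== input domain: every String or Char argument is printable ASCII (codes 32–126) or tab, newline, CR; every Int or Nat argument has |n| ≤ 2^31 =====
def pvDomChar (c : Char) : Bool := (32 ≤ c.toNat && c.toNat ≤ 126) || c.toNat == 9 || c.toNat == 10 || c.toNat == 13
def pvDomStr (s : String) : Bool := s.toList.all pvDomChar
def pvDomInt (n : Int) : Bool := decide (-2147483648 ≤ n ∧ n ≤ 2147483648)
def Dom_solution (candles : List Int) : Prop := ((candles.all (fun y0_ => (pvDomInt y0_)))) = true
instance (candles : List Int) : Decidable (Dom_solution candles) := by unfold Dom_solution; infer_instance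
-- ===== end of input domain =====

-- B sorts once and then maintains the sorted order with a linear two-pointer merge each day
-- instead of re-sorting (alternative decomposition, not claimed faster); equivalence is about the
-- RETURN value only: A sorts and decrements the caller's list in place, B does not mutate it.

-- ===== PORT A =====
-- the for-loop with early return, ported as recursion on the remaining number of days (fuel)
def solutionGoA (i fuel : Nat) (c : List Int) : Int :=
  match fuel with
  | 0 => Int.ofNat i            -- loop finished: Python's `return i + 1` with last i = i - 1
  | fuel + 1 =>
    -- candles.sort(reverse=True); if 0 in candles[:i+1]: return i
    if (0 : Int) ∈ PySem.List.slice (PySem.List.sorted c (fun x => x) true) none (some ((i : Int) + 1)) then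
      Int.ofNat i
    else
      -- for j in range(i+1): candles[j] -= 1
      solutionGoA (i + 1) fuel
        ((List.range (i + 1)).foldl (fun acc j => acc.modify j (· - 1))
          (PySem.List.sorted c (fun x => x) true))

def solution (candles : List Int) : Int :=
  solutionGoA 0 candles.length candles

-- ===== PORT B =====
-- the two-pointer while-loop of Source B
def mergeAsc : List Int → List Int → List Int
  | [], ys => ys
  | x :: xs, [] => x :: xs
  | x :: xs, y :: ys => if x ≤ y then x :: mergeAsc xs (y :: ys) else y :: mergeAsc (x :: xs) ys

def solutionGoB (i fuel n : Nat) (asc : List Int) : Int :=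
  match fuel with
  | 0 => Int.ofNat n
  | fuel + 1 =>
    -- tail = asc[n-k:]; if 0 in tail: return i
    if (0 : Int) ∈ asc.drop (n - (i + 1)) then Int.ofNat i
    else
      -- asc = merge of asc[:n-k] and [x - 1 for x in tail]
      solutionGoB (i + 1) fuel n
        (mergeAsc (asc.take (n - (i + 1))) ((asc.drop (n - (i + 1))).map (· - 1)))

def solution_alt (candles : List Int) : Int :=
  solutionGoB 0 candles.length candles.length (PySem.List.sorted candles (fun x => x) false)

-- ===== PRECONDITION & SPEC =====
-- Pre_ excludes only the empty list, on which Python A raises UnboundLocalError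
-- (the loop variable `i` is unbound at `return i + 1`).
def Pre_solution (candles : List Int) : Prop := candles ≠ []
instance (candles : List Int) : Decidable (Pre_solution candles) := by unfold Pre_solution; infer_instance
def pvWitness_solution : List Int := ([1, 0, 3])

def Spec_solution (candles : List Int) (out : Int) : Prop := out = solution_alt candles
instance (candles : List Int) (out : Int) : Decidable (Spec_solution candles out) := by unfold Spec_solution; infer_instance

-- ===== CLAIM (what is proved, stated in full; the proofs are below) =====
def Claim_equal_solution : Prop := ∀ (candles : List Int), Dom_solution candles → Pre_solution candles → Spec_solution candles (solution candles)

-- ===== LEMMAS AND PROOFS =====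

-- the merge is a permutation of the two inputs appended
theorem mergeAsc_perm : ∀ (xs ys : List Int), (mergeAsc xs ys).Perm (xs ++ ys) := by
  intro xs ys
  fun_induction mergeAsc xs ys with
  | case1 ys => exact (List.nil_append ys) ▸ List.Perm.refl ys
  | case2 x xs => simp
  | case3 x xs y ys h ih => exact ih.cons x
  | case4 x xs y ys h ih => exact (ih.cons y).trans List.perm_middle.symm

-- merging two ascending lists gives an ascending list
theorem mergeAsc_pairwise : ∀ (xs ys : List Int),
    xs.Pairwise (· ≤ ·) → ys.Pairwise (· ≤ ·) → (mergeAsc xs ys).Pairwise (· ≤ ·) := by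
  intro xs ys
  fun_induction mergeAsc xs ys with
  | case1 ys => intro _ h; exact h
  | case2 x xs => intro h _; exact h
  | case3 x xs y ys h ih =>
    intro hx hy
    rw [List.pairwise_cons] at hx
    rw [List.pairwise_cons]
    refine ⟨fun z hz => ?_, ih hx.2 hy⟩
    rcases List.mem_append.mp ((mergeAsc_perm xs (y :: ys)).mem_iff.mp hz) with hz | hz
    · exact hx.1 z hz
    · rcases List.mem_cons.mp hz with rfl | hz
      · exact h
      · exact le_trans h ((List.pairwise_cons.mp hy).1 z hz)
  | case4 x xs y ys h ih =>
    intro hx hy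
    rw [List.pairwise_cons] at hy
    rw [List.pairwise_cons]
    refine ⟨fun z hz => ?_, ih hx hy.2⟩
    have hyx : y ≤ x := le_of_lt (lt_of_not_ge h)
    rcases List.mem_append.mp ((mergeAsc_perm (x :: xs) ys).mem_iff.mp hz) with hz | hz
    · rcases List.mem_cons.mp hz with rfl | hz
      · exact hyx
      · exact le_trans hyx ((List.pairwise_cons.mp hx).1 z hz)
    · exact hy.1 z hz

-- modifying exactly past a prefix
theorem modify_append_cons (f : Int → Int) : ∀ (P : List Int) (x : Int) (D : List Int),
    (P ++ x :: D).modify P.length f = P ++ f x :: D := by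
  intro P
  induction P with
  | nil => intro x D; rfl
  | cons p P ih =>
    intro x D
    simp only [List.cons_append, List.length_cons]
    exact congrArg (p :: ·) (ih x D)

-- A's inner decrement loop, in closed form
theorem foldl_modify_range (f : Int → Int) :
    ∀ (k : Nat) (l : List Int),
      (List.range k).foldl (fun acc j => acc.modify j f) l = (l.take k).map f ++ l.drop k := by
  intro k
  induction k with
  | zero => intro l; simp
  | succ k ih =>
    intro l
    rw [List.range_succ, List.foldl_append, ih, List.foldl_cons, List.foldl_nil]
    by_cases hk : k < l.length
    · have hP : ((l.take k).map f).length = k := by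
        simp [Nat.min_eq_left (Nat.le_of_lt hk)]
      have hdrop : l.drop k = l[k] :: l.drop (k + 1) := (List.getElem_cons_drop hk).symm
      have hm := modify_append_cons f ((l.take k).map f) l[k] (l.drop (k + 1))
      rw [hP] at hm
      have ht : (l.map f).take (k + 1) = (l.map f).take k ++ [f l[k]] := by
        rw [List.take_add_one]
        simp [hk]
      rw [hdrop, hm]
      simp [List.map_take, ht]
    · have hk' : l.length ≤ k := Nat.le_of_not_lt hk
      rw [List.take_of_length_le hk', List.take_of_length_le (by omega),
          List.drop_of_length_le hk', List.drop_of_length_le (by omega)]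
      simp only [List.append_nil]
      exact List.modify_eq_self (by simp [hk'])

-- Python's stable descending sort of an Int list is the reverse of any ascending ordering
theorem sortedDesc_eq (c asc : List Int) (hp : c.Perm asc) (hs : asc.Pairwise (· ≤ ·)) :
    PySem.List.sorted c (fun x => x) true = asc.reverse := by
  refine List.Perm.eq_of_pairwise (le := fun a b : Int => b ≤ a)
    (fun a b _ _ h1 h2 => le_antisymm h2 h1) ?_ ?_ ?_
  · exact PySem.List.sorted_pairwise_rev c (fun x => x)
  · exact List.pairwise_reverse.mpr hs
  · exact ((PySem.List.sorted_perm c (fun x => x) true).trans hp).trans (asc.reverse_perm).symm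

-- the main loop invariant: A's state is a permutation of B's sorted state
theorem go_eq : ∀ (fuel i : Nat) (c asc : List Int),
    c.Perm asc → asc.Pairwise (· ≤ ·) → i + fuel = asc.length →
    solutionGoA i fuel c = solutionGoB i fuel asc.length asc := by
  intro fuel
  induction fuel with
  | zero =>
    intro i c asc _ _ hn
    simp only [solutionGoA, solutionGoB]
    rw [show i = asc.length by omega]
  | succ fuel ih =>
    intro i c asc hp hs hn
    have hsort : PySem.List.sorted c (fun x => x) true = asc.reverse := sortedDesc_eq c asc hp hs
    have hslice : PySem.List.slice (PySem.List.sorted c (fun x => x) true) none (some ((i : Int) + 1))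
        = (asc.drop (asc.length - (i + 1))).reverse := by
      rw [hsort, show ((i : Int) + 1) = ((i + 1 : Nat) : Int) by push_cast; ring,
          PySem.List.slice_to_natCast, List.take_reverse]
    rw [solutionGoA, solutionGoB, hslice]
    by_cases h0 : (0 : Int) ∈ asc.drop (asc.length - (i + 1))
    · rw [if_pos (List.mem_reverse.mpr h0), if_pos h0]
    · rw [if_neg (fun hc => h0 (List.mem_reverse.mp hc)), if_neg h0]
      have hA : (List.range (i + 1)).foldl (fun acc j => acc.modify j (· - 1))
          (PySem.List.sorted c (fun x => x) true)
          = ((asc.drop (asc.length - (i + 1))).map (· - 1)).reverse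
            ++ (asc.take (asc.length - (i + 1))).reverse := by
        rw [hsort, foldl_modify_range, List.take_reverse, List.drop_reverse, List.map_reverse]
      have hperm : (((asc.drop (asc.length - (i + 1))).map (· - 1)).reverse
            ++ (asc.take (asc.length - (i + 1))).reverse).Perm
          (mergeAsc (asc.take (asc.length - (i + 1))) ((asc.drop (asc.length - (i + 1))).map (· - 1))) := by
        refine ((List.Perm.append (List.reverse_perm _) (List.reverse_perm _)).trans ?_)
        exact (List.perm_append_comm).trans
          (mergeAsc_perm (asc.take (asc.length - (i + 1))) ((asc.drop (asc.length - (i + 1))).map (· - 1))).symm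
      have hsorted : (mergeAsc (asc.take (asc.length - (i + 1)))
          ((asc.drop (asc.length - (i + 1))).map (· - 1))).Pairwise (· ≤ ·) := by
        refine mergeAsc_pairwise _ _ (hs.take) ?_
        exact List.pairwise_map.mpr ((hs.drop).imp (by intro a b hab; omega))
      have hlen : (mergeAsc (asc.take (asc.length - (i + 1)))
          ((asc.drop (asc.length - (i + 1))).map (· - 1))).length = asc.length := by
        have hl := (mergeAsc_perm (asc.take (asc.length - (i + 1)))
          ((asc.drop (asc.length - (i + 1))).map (· - 1))).length_eq
        rw [List.length_append, List.length_map, List.length_take, List.length_drop] at hl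
        omega
      rw [hA, ih (i + 1) _ _ hperm hsorted (by omega), hlen]

-- ===== VERDICT (by name: the statement is the Claim_ definition above) =====
theorem solution_spec : Claim_equal_solution := by
  intro candles _ _
  unfold Spec_solution solution solution_alt
  have hp : candles.Perm (PySem.List.sorted candles (fun x => x) false) :=
    (PySem.List.sorted_perm candles (fun x => x) false).symm
  have hlen : (PySem.List.sorted candles (fun x => x) false).length = candles.length :=
    PySem.List.length_sorted candles (fun x => x) false
  have h := go_eq candles.length 0 candles (PySem.List.sorted candles (fun x => x) false)
    hp (PySem.List.sorted_pairwise candles (fun x => x)) (by omega)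
  rw [hlen] at h
  exact h
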